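-- pv_equiv track=rewrite | github.com/mitsuhashi/chattogovar | src/stats/table5.py | build_category_order
-- ===== SOURCE A (Python) =====
-- from typing import Any, Dict, List, Tuple
--
-- def q_key_to_int(q: str) -> int:
--     s = str(q).strip()
--     if len(s) >= 2 and (s[0].lower() == "q"):
--         try:
--             return int(s[1:])
--         except Exception:
--             pass
--     return 10**9
--
-- def build_category_order(q2cat: Dict[str, str]) -> List[str]:
--     cats: List[str] = []
--     seen = set()
--     for q, cat in sorted(q2cat.items(), key=lambda kv: q_key_to_int(kv[0])):
--         if cat not in seen:
--             cats.append(cat)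
--             seen.add(cat)
--     return cats
-- ===== SOURCE B (Python) =====
-- def q_key_to_int(q: str) -> int:
--     s = str(q).strip()
--     if len(s) >= 2 and (s[0].lower() == "q"):
--         try:
--             return int(s[1:])
--         except Exception:
--             pass
--     return 10**9
--
-- def build_category_order(q2cat):
--     # one linear pass: map each category to its minimal (q-key, position) pair,
--     # then sort only the (few) categories by that representative
--     best = {}
--     for idx, (q, cat) in enumerate(q2cat.items()):
--         key = (q_key_to_int(q), idx)
--         if cat not in best or key < best[cat]:
--             best[cat] = key
--     return [cat for cat, _ in sorted(best.items(), key=lambda kv: kv[1])]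
-- ===== Notes on version B (the rewrite author's own statement) =====
-- stated objective: alternative
-- what changed: A stable-sorts all n items by q-key and then deduplicates categories first-seen; B makes one linear pass building a category -> minimal (q-key, index) table and then sorts only the k distinct categories by that representative pair.
import Mathlib
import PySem

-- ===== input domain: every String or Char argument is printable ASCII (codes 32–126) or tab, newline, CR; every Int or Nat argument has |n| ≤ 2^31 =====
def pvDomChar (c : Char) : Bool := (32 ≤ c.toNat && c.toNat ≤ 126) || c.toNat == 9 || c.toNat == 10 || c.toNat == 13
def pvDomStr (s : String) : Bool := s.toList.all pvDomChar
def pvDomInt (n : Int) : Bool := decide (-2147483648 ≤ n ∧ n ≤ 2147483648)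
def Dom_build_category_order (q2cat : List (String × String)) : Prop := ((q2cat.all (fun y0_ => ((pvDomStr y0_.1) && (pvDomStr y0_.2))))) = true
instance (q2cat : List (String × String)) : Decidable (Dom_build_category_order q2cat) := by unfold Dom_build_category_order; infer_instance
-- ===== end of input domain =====

-- B replaces A's "stable-sort all items, then first-seen dedup of categories" by "one pass
-- building a category → minimal (q-key, position) table, then sort only the distinct
-- categories by that representative" (objective: alternative decomposition, same result).

-- ===== PORT A =====

-- helper q_key_to_int (module-level helper used by both Pythons)
def qKeyToInt (q : String) : Int :=
  -- s = str(q).strip(); if len(s) >= 2 and s[0].lower() == "q": try: return int(s[1:]) except: pass; return 10**9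
  match PySem.Chars.strip q.toList with
  | c0 :: c1 :: rest =>
      if PySem.Chars.lowerChar c0 = 'q' then
        match PySem.Int.ofChars? (c1 :: rest) with
        | some n => n
        | none => 10 ^ 9
      else 10 ^ 9
  | _ => 10 ^ 9

-- for q, cat in sorted(q2cat.items(), key=lambda kv: q_key_to_int(kv[0])): first-seen dedup of cats
def build_category_order (q2cat : List (String × String)) : List String :=
  ((PySem.List.sorted q2cat (fun kv => qKeyToInt kv.1) false).foldl
    (fun (st : List String × PySem.Set String) qc =>
      if PySem.Set.contains st.2 qc.2 then st
      else (st.1 ++ [qc.2], PySem.Set.add st.2 qc.2))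
    ([], PySem.Set.empty)).1

-- ===== PORT B =====

-- Python's tuple comparison (a1, a2) < (b1, b2) on ints, exact
def pyTupLt (a b : Int × Int) : Bool :=
  decide (a.1 < b.1) || (a.1 == b.1 && decide (a.2 < b.2))

-- Source B's loop "for idx, (q, cat) in enumerate(q2cat.items()): ..." — the counter n is idx
def bestFold : PySem.Dict String (Int × Int) → Int → List (String × String) → PySem.Dict String (Int × Int)
  | d, _, [] => d
  | d, n, (q, cat) :: rest =>
      bestFold
        (if !d.contains cat || pyTupLt (qKeyToInt q, n) (d.getD cat (0, 0)) then
          d.insert cat (qKeyToInt q, n)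
        else d)
        (n + 1) rest

-- [cat for cat, _ in sorted(best.items(), key=lambda kv: kv[1])]
def build_category_order_alt (q2cat : List (String × String)) : List String :=
  (PySem.List.sorted2 (bestFold PySem.Dict.empty 0 q2cat).items
      (fun kv => kv.2.1) (fun kv => kv.2.2) false).map Prod.fst

-- ===== PRECONDITION & SPEC =====
def Spec_build_category_order (q2cat : List (String × String)) (out : List String) : Prop := out = build_category_order_alt q2cat
instance (q2cat : List (String × String)) (out : List String) : Decidable (Spec_build_category_order q2cat out) := by unfold Spec_build_category_order; infer_instance

-- ===== CLAIM (what is proved, stated in full; the proofs are below) =====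
def Claim_equal_build_category_order : Prop := ∀ (q2cat : List (String × String)), Dom_build_category_order q2cat → Spec_build_category_order q2cat (build_category_order q2cat)

-- ===== LEMMAS AND PROOFS =====

-- ghost apparatus: the enumerated item list, its (q-key, index) values, and the
-- lexicographic order Python's stable sort and tuple comparison induce on them

def pvEn : Int → List (String × String) → List (Int × (String × String))
  | _, [] => []
  | n, x :: xs => (n, x) :: pvEn (n + 1) xs

def pvVal (p : Int × (String × String)) : Int × Int := (qKeyToInt p.2.1, p.1)

def pvLexKey (p : Int × (String × String)) : Lex (Int × Int) := toLex (pvVal p)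

def pvBL (a b : Int × (String × String)) : Bool := decide (pvLexKey a < pvLexKey b)

def pvBK (a b : String × String) : Bool := decide (qKeyToInt a.1 < qKeyToInt b.1)

def pvFo : List (Int × (String × String)) → String → Option (Int × Int)
  | [], _ => none
  | p :: t, c => if p.2.2 = c then some (pvVal p) else pvFo t c

def pvMin (a b : Int × Int) : Int × Int := if toLex b < toLex a then b else a

def pvMv : Int → List (String × String) → String → Option (Int × Int)
  | _, [], _ => none
  | n, (q, cat) :: t, c =>
      let r := pvMv (n + 1) t c
      if cat = c then
        some (match r with | none => (qKeyToInt q, n) | some w => pvMin (qKeyToInt q, n) w)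
      else r

def pvMerge : Option (Int × Int) → Option (Int × Int) → Option (Int × Int)
  | none, r => r
  | some w, none => some w
  | some w, some v => some (pvMin w v)

def pvOlt : Option (Int × Int) → Option (Int × Int) → Prop
  | some v, some w => toLex v < toLex w
  | _, _ => False

lemma pvTupLt_eq (a b : Int × Int) : pyTupLt a b = decide (toLex a < toLex b) := by
  unfold pyTupLt
  rw [Bool.eq_iff_iff]
  simp only [Bool.or_eq_true, Bool.and_eq_true, decide_eq_true_eq, beq_iff_eq,
    Prod.Lex.toLex_lt_toLex]

lemma pvMin_toLex (a b : Int × Int) : toLex (pvMin a b) = min (toLex a) (toLex b) := by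
  unfold pvMin
  rw [apply_ite toLex]
  split_ifs with h
  · exact (min_eq_right h.le).symm
  · exact (min_eq_left (not_lt.mp h)).symm

lemma pvMin_of_lt {a b : Int × Int} (h : toLex b < toLex a) : pvMin a b = b := by
  rw [pvMin, if_pos h]

lemma pvMin_of_not_lt {a b : Int × Int} (h : ¬ toLex b < toLex a) : pvMin a b = a := by
  rw [pvMin, if_neg h]

lemma pvSorted2Lex {α : Type} (xs : List α) (k1 k2 : α → Int) :
    PySem.List.sorted2 xs k1 k2 false = PySem.List.sorted xs (fun x => toLex (k1 x, k2 x)) false := by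
  show List.foldl _ [] xs = List.foldl _ [] xs
  have hb : (fun a b => decide (k1 a < k1 b) || (!decide (k1 b < k1 a) && decide (k2 a < k2 b)))
      = (fun a b => decide ((fun x => toLex (k1 x, k2 x)) a < (fun x => toLex (k1 x, k2 x)) b)) := by
    funext a b
    rw [Bool.eq_iff_iff]
    simp only [Bool.or_eq_true, Bool.and_eq_true, decide_eq_true_eq,
      Bool.not_eq_true', decide_eq_false_iff_not, Prod.Lex.toLex_lt_toLex]
    omega
  rw [hb]

lemma pvAfold (xs : List (String × String)) : ∀ (c : List String),
    ((xs.foldl (fun (st : List String × PySem.Set String) qc =>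
      if PySem.Set.contains st.2 qc.2 then st
      else (st.1 ++ [qc.2], PySem.Set.add st.2 qc.2)) (c, c)).1
      = List.foldl PySem.Set.add c (xs.map Prod.snd)) := by
  induction xs with
  | nil => intro c; rfl
  | cons x t ih =>
    intro c
    simp only [List.foldl_cons, List.map_cons]
    by_cases h : PySem.Set.contains c x.2 = true
    · rw [if_pos h]
      have : PySem.Set.add c x.2 = c := by
        apply PySem.Set.add_of_mem
        simpa [PySem.Set.contains_eq_decide] using h
      rw [this, ih]
    · rw [if_neg h]
      have : PySem.Set.add c x.2 = c ++ [x.2] := by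
        apply PySem.Set.add_of_not_mem
        simpa [PySem.Set.contains_eq_decide] using h
      rw [this, ih]

lemma pvEnMap (l : List (String × String)) : ∀ n, (pvEn n l).map (fun p => p.2.2) = l.map Prod.snd := by
  induction l with
  | nil => intro n; rfl
  | cons x t ih => intro n; simp [pvEn, ih]

lemma pvFoSpec (zs : List (Int × (String × String))) (c : String) :
    (pvFo zs c = none ∧ ∀ p ∈ zs, p.2.2 ≠ c)
    ∨ (∃ p ∈ zs, p.2.2 = c ∧ pvFo zs c = some (pvVal p)) := by
  induction zs with
  | nil => exact Or.inl ⟨rfl, by simp⟩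
  | cons z t ih =>
    by_cases h : z.2.2 = c
    · exact Or.inr ⟨z, List.mem_cons_self, h, by simp [pvFo, h]⟩
    · rcases ih with ⟨h1, h2⟩ | ⟨p, hp, hc, hf⟩
      · refine Or.inl ⟨by simp [pvFo, h, h1], ?_⟩
        intro p hp
        rcases List.mem_cons.mp hp with rfl | hp
        · exact h
        · exact h2 p hp
      · exact Or.inr ⟨p, List.mem_cons_of_mem _ hp, hc, by simp [pvFo, h, hf]⟩

lemma pvFoLe (zs : List (Int × (String × String)))
    (hp : zs.Pairwise (fun p q => pvLexKey p < pvLexKey q)) (c : String) (v : Int × Int)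
    (hv : pvFo zs c = some v) :
    ∀ p ∈ zs, p.2.2 = c → toLex v ≤ toLex (pvVal p) := by
  induction zs with
  | nil => exact absurd hv (by simp [pvFo])
  | cons z t ih =>
    rcases List.pairwise_cons.mp hp with ⟨hz, ht⟩
    by_cases h : z.2.2 = c
    · simp only [pvFo, h, if_true] at hv
      intro p hmem hpc
      rcases List.mem_cons.mp hmem with rfl | hmem
      · cases hv; exact le_refl _
      · cases hv; exact le_of_lt (hz p hmem)
    · simp only [pvFo, if_neg h] at hv
      intro p hmem hpc
      rcases List.mem_cons.mp hmem with rfl | hmem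
      · exact absurd hpc h
      · exact ih ht hv p hmem hpc

lemma pvInsMap (x : Int × (String × String)) (acc : List (Int × (String × String)))
    (h : ∀ p ∈ acc, p.1 < x.1) :
    (PySem.List.insertBy pvBL x acc).map Prod.snd
      = PySem.List.insertBy pvBK x.2 (acc.map Prod.snd) := by
  induction acc with
  | nil => rfl
  | cons y ys ih =>
    have hbl : pvBL x y = pvBK x.2 y.2 := by
      have hy : y.1 < x.1 := h y List.mem_cons_self
      unfold pvBL pvBK pvLexKey pvVal
      rw [Bool.eq_iff_iff]
      simp only [decide_eq_true_eq, Prod.Lex.toLex_lt_toLex]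
      constructor
      · rintro (h1 | ⟨h1, h2⟩)
        · exact h1
        · omega
      · intro h1; exact Or.inl h1
    simp only [PySem.List.insertBy, List.map_cons]
    rw [hbl]
    by_cases hb : pvBK x.2 y.2 = true
    · simp [hb]
    · simp only [Bool.not_eq_true] at hb
      simp [hb, ih (fun p hp => h p (List.mem_cons_of_mem _ hp))]

lemma pvInsPairwise (x : Int × (String × String)) (acc : List (Int × (String × String)))
    (h : ∀ p ∈ acc, p.1 < x.1) (hp : acc.Pairwise (fun p q => pvLexKey p < pvLexKey q)) :
    (PySem.List.insertBy pvBL x acc).Pairwise (fun p q => pvLexKey p < pvLexKey q) := by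
  induction acc with
  | nil => simp [PySem.List.insertBy]
  | cons y ys ih =>
    rcases List.pairwise_cons.mp hp with ⟨hy, hys⟩
    simp only [PySem.List.insertBy]
    by_cases hb : pvBL x y = true
    · rw [if_pos hb]
      have hxy : pvLexKey x < pvLexKey y := by
        simpa [pvBL, decide_eq_true_eq] using hb
      exact List.pairwise_cons.mpr ⟨by
        intro p hmem
        rcases List.mem_cons.mp hmem with rfl | hmem
        · exact hxy
        · exact lt_trans hxy (hy p hmem), hp⟩
    · rw [if_neg hb]
      have hyx : pvLexKey y < pvLexKey x := by
        have hnlt : ¬ pvLexKey x < pvLexKey y := by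
          simpa [pvBL, decide_eq_true_eq] using hb
        rcases lt_trichotomy (pvLexKey y) (pvLexKey x) with h1 | h1 | h1
        · exact h1
        · exfalso
          have : y.1 = x.1 := by
            have := congrArg ofLex h1
            unfold pvLexKey pvVal at this
            simpa using congrArg Prod.snd this
          exact absurd (this ▸ h y List.mem_cons_self) (lt_irrefl _)
        · exact absurd h1 hnlt
      refine List.pairwise_cons.mpr ⟨?_, ih (fun p hpm => h p (List.mem_cons_of_mem _ hpm)) hys⟩
      intro p hmem
      rcases (PySem.List.mem_insertBy _ _ _ _).mp hmem with rfl | hmem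
      · exact hyx
      · exact hy p hmem

lemma pvFold (l : List (String × String)) : ∀ (n : Int) (acc : List (Int × (String × String))),
    (∀ p ∈ acc, p.1 < n) → acc.Pairwise (fun p q => pvLexKey p < pvLexKey q) →
    ((List.foldl (fun a x => PySem.List.insertBy pvBL x a) acc (pvEn n l)).map Prod.snd
        = List.foldl (fun a x => PySem.List.insertBy pvBK x a) (acc.map Prod.snd) l)
      ∧ (∀ p ∈ List.foldl (fun a x => PySem.List.insertBy pvBL x a) acc (pvEn n l), p.1 < n + l.length)
      ∧ (List.foldl (fun a x => PySem.List.insertBy pvBL x a) acc (pvEn n l)).Pairwise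
          (fun p q => pvLexKey p < pvLexKey q) := by
  induction l with
  | nil =>
    intro n acc hb hp
    refine ⟨rfl, ?_, hp⟩
    simpa using hb
  | cons x t ih =>
    intro n acc hb hp
    have hb' : ∀ p ∈ PySem.List.insertBy pvBL (n, x) acc, p.1 < n + 1 := by
      intro p hmem
      rcases (PySem.List.mem_insertBy _ _ _ _).mp hmem with rfl | hmem
      · omega
      · have := hb p hmem; omega
    have hp' := pvInsPairwise (n, x) acc hb hp
    have hmap : (PySem.List.insertBy pvBL (n, x) acc).map Prod.snd
        = PySem.List.insertBy pvBK x (acc.map Prod.snd) := pvInsMap (n, x) acc hb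
    rcases ih (n + 1) (PySem.List.insertBy pvBL (n, x) acc) hb' hp' with ⟨h1, h2, h3⟩
    refine ⟨?_, ?_, ?_⟩
    · simpa [pvEn, hmap] using h1
    · intro p hmem
      simp only [pvEn, List.foldl_cons] at hmem
      have := h2 p hmem
      simp only [List.length_cons]
      omega
    · simpa [pvEn] using h3

lemma pvMvSpec (l : List (String × String)) : ∀ (n : Int) (c : String),
    (pvMv n l c = none ∧ ∀ p ∈ pvEn n l, p.2.2 ≠ c)
    ∨ (∃ v, pvMv n l c = some v ∧ (∃ p ∈ pvEn n l, p.2.2 = c ∧ pvVal p = v)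
        ∧ ∀ p ∈ pvEn n l, p.2.2 = c → ¬ (toLex (pvVal p) < toLex v)) := by
  induction l with
  | nil => intro n c; exact Or.inl ⟨rfl, by simp [pvEn]⟩
  | cons x t ih =>
    intro n c
    obtain ⟨q, cat⟩ := x
    by_cases h : cat = c
    · right
      rcases ih (n + 1) c with ⟨h1, h2⟩ | ⟨v, h1, ⟨p, hpm, hpc, hpv⟩, h3⟩
      · refine ⟨(qKeyToInt q, n), by simp [pvMv, h, h1], ⟨(n, (q, cat)), by simp [pvEn], h, rfl⟩, ?_⟩
        intro p hmem hpc
        rcases List.mem_cons.mp hmem with rfl | hmem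
        · simp [pvVal]
        · exact absurd hpc (h2 p hmem)
      · refine ⟨pvMin (qKeyToInt q, n) v, by simp [pvMv, h, h1], ?_, ?_⟩
        · by_cases hlt : toLex v < toLex (qKeyToInt q, n)
          · refine ⟨p, List.mem_cons_of_mem _ hpm, hpc, ?_⟩
            rw [hpv]; unfold pvMin; rw [if_pos hlt]
          · refine ⟨(n, (q, cat)), List.mem_cons_self, h, ?_⟩
            unfold pvMin; rw [if_neg hlt]; rfl
        · intro p' hmem hpc'
          have hmin : toLex (pvMin (qKeyToInt q, n) v) = min (toLex (qKeyToInt q, n)) (toLex v) :=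
            pvMin_toLex _ _
          rcases List.mem_cons.mp hmem with rfl | hmem
          · rw [hmin]
            simp only [pvVal, lt_min_iff, not_and]
            intro hlt; exact absurd hlt (lt_irrefl _)
          · have := h3 p' hmem hpc'
            rw [hmin]
            simp only [lt_min_iff, not_and]
            intro _; exact this
    · rcases ih (n + 1) c with ⟨h1, h2⟩ | ⟨v, h1, h2, h3⟩
      · left
        refine ⟨by simp [pvMv, h, h1], ?_⟩
        intro p hmem
        rcases List.mem_cons.mp hmem with rfl | hmem
        · exact h
        · exact h2 p hmem
      · right
        refine ⟨v, by simp [pvMv, h, h1], ?_, ?_⟩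
        · obtain ⟨p, hm, hc2, hv2⟩ := h2
          exact ⟨p, List.mem_cons_of_mem _ hm, hc2, hv2⟩
        · intro p hmem hpc
          rcases List.mem_cons.mp hmem with rfl | hmem
          · exact absurd hpc h
          · exact h3 p hmem hpc

lemma pvBF (l : List (String × String)) : ∀ (n : Int) (d : PySem.Dict String (Int × Int)) (c : String),
    (bestFold d n l).get? c = pvMerge (d.get? c) (pvMv n l c) := by
  induction l with
  | nil =>
    intro n d c
    cases h : d.get? c <;> simp [bestFold, pvMv, pvMerge, h]
  | cons x t ih =>
    intro n d c
    obtain ⟨q, cat⟩ := x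
    simp only [bestFold]
    rw [ih]
    by_cases hc : cat = c
    · subst hc
      cases hd : d.get? cat with
      | none =>
        have hcont : d.contains cat = false := (PySem.Dict.get?_eq_none_iff_contains d cat).mp hd
        rw [if_pos (by simp [hcont])]
        rw [PySem.Dict.get?_insert, if_pos rfl]
        cases hr : pvMv (n + 1) t cat with
        | none => simp [pvMerge, pvMv, hr]
        | some r => simp [pvMerge, pvMv, hr]
      | some w =>
        have hcont : d.contains cat = true := by
          rw [PySem.Dict.contains_eq_isSome_get?, hd]; rfl
        have hgd : d.getD cat (0, 0) = w := by
          rw [PySem.Dict.getD_eq_get?_getD, hd]; rfl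
        rw [hcont, hgd]
        simp only [Bool.not_true, Bool.false_or, pvTupLt_eq]
        by_cases hlt : toLex (qKeyToInt q, n) < toLex w
        · rw [if_pos (by simp [hlt])]
          rw [PySem.Dict.get?_insert, if_pos rfl]
          cases hr : pvMv (n + 1) t cat with
          | none =>
            have hmv : pvMv n ((q, cat) :: t) cat = some (qKeyToInt q, n) := by
              simp [pvMv, hr]
            rw [hmv]
            show some (qKeyToInt q, n) = some (pvMin w (qKeyToInt q, n))
            rw [pvMin_of_lt hlt]
          | some r =>
            have hmv : pvMv n ((q, cat) :: t) cat = some (pvMin (qKeyToInt q, n) r) := by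
              simp [pvMv, hr]
            rw [hmv]
            show some (pvMin (qKeyToInt q, n) r) = some (pvMin w (pvMin (qKeyToInt q, n) r))
            have hz : toLex (pvMin (qKeyToInt q, n) r) < toLex w := by
              rw [pvMin_toLex]
              exact lt_of_le_of_lt (min_le_left _ _) hlt
            rw [pvMin_of_lt hz]
        · rw [if_neg (by simp [hlt])]
          cases hr : pvMv (n + 1) t cat with
          | none =>
            have hmv : pvMv n ((q, cat) :: t) cat = some (qKeyToInt q, n) := by
              simp [pvMv, hr]
            rw [hmv, hd]
            show some w = some (pvMin w (qKeyToInt q, n))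
            rw [pvMin_of_not_lt hlt]
          | some r =>
            have hmv : pvMv n ((q, cat) :: t) cat = some (pvMin (qKeyToInt q, n) r) := by
              simp [pvMv, hr]
            rw [hmv, hd]
            show some (pvMin w r) = some (pvMin w (pvMin (qKeyToInt q, n) r))
            congr 1
            apply toLex.injective
            simp only [pvMin_toLex]
            rw [← min_assoc, min_eq_left (not_lt.mp hlt)]
    · have h1 : pvMv n ((q, cat) :: t) c = pvMv (n + 1) t c := by
        simp [pvMv, hc]
      rw [h1]
      by_cases hb : (!d.contains cat || pyTupLt (qKeyToInt q, n) (d.getD cat (0, 0))) = true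
      · rw [if_pos hb, PySem.Dict.get?_insert, if_neg (by exact fun h => hc h.symm)]
      · rw [if_neg hb]

lemma pvBFkeys (l : List (String × String)) : ∀ (n : Int) (d : PySem.Dict String (Int × Int)),
    (bestFold d n l).keys = List.foldl PySem.Set.add d.keys (l.map Prod.snd) := by
  induction l with
  | nil => intro n d; rfl
  | cons x t ih =>
    intro n d
    obtain ⟨q, cat⟩ := x
    simp only [bestFold, List.map_cons, List.foldl_cons]
    cases hc : d.contains cat with
    | true =>
      have hmem : cat ∈ d.keys := (PySem.Dict.contains_iff_mem_keys d cat).mp hc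
      have hadd : PySem.Set.add d.keys cat = d.keys := PySem.Set.add_of_mem hmem
      rw [hadd]
      by_cases hb : (!true || pyTupLt (qKeyToInt q, n) (d.getD cat (0, 0))) = true
      · rw [if_pos hb, ih, PySem.Dict.keys_insert_of_contains d _ hc]
      · rw [if_neg hb, ih]
    | false =>
      have hmem : cat ∉ d.keys := by
        intro hm
        rw [(PySem.Dict.contains_iff_mem_keys d cat).mpr hm] at hc
        cases hc
      rw [if_pos (by simp), ih, PySem.Dict.keys_insert_of_not_contains d _ hc,
        PySem.Set.add_of_not_mem hmem]

lemma pvFoMv (l : List (String × String)) (zs : List (Int × (String × String)))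
    (hperm : zs.Perm (pvEn 0 l)) (hp : zs.Pairwise (fun p q => pvLexKey p < pvLexKey q)) (c : String) :
    pvFo zs c = pvMv 0 l c := by
  rcases pvMvSpec l 0 c with ⟨h1, h2⟩ | ⟨v, h1, ⟨p, hpm, hpc, hpv⟩, h3⟩
  · rw [h1]
    rcases pvFoSpec zs c with ⟨hf, _⟩ | ⟨p, hpm, hpc, hf⟩
    · exact hf
    · exact absurd hpc (h2 p (hperm.mem_iff.mp hpm))
  · rw [h1]
    rcases pvFoSpec zs c with ⟨hf, hnone⟩ | ⟨p', hpm', hpc', hf⟩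
    · exact absurd hpc (hnone p (hperm.mem_iff.mpr hpm))
    · rw [hf]
      congr 1
      have hle : toLex (pvVal p') ≤ toLex (pvVal p) := by
        have := pvFoLe zs hp c (pvVal p') hf
        exact this p (hperm.mem_iff.mpr hpm) hpc
      have hnlt : ¬ (toLex (pvVal p') < toLex v) := h3 p' (hperm.mem_iff.mp hpm') hpc'
      apply toLex.injective
      rw [hpv] at hle
      exact le_antisymm hle (not_lt.mp hnlt)

lemma pvDP (zs : List (Int × (String × String)))
    (hp : zs.Pairwise (fun p q => pvLexKey p < pvLexKey q)) :
    (PySem.Set.ofList (zs.map (fun p => p.2.2))).Pairwise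
      (fun a b => pvOlt (pvFo zs a) (pvFo zs b)) := by
  induction zs with
  | nil => simp [PySem.Set.ofList_nil]
  | cons z t ih =>
    rcases List.pairwise_cons.mp hp with ⟨hz, ht⟩
    simp only [List.map_cons]
    rw [PySem.Set.ofList_cons]
    refine List.pairwise_cons.mpr ⟨?_, ?_⟩
    · intro b hb
      rcases (PySem.Set.mem_discard _ _ b).mp hb with ⟨hbmem, hbne⟩
      have hbmap : b ∈ t.map (fun p => p.2.2) := (PySem.Set.mem_ofList _ b).mp hbmem
      obtain ⟨p, hpt, hpb⟩ := List.mem_map.mp hbmap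
      have hfz : pvFo (z :: t) z.2.2 = some (pvVal z) := by
        simp [pvFo]
      have hfb : pvFo (z :: t) b = pvFo t b := by
        have : z.2.2 ≠ b := fun h => hbne h.symm
        simp [pvFo, this]
      rw [hfz, hfb]
      rcases pvFoSpec t b with ⟨_, hno⟩ | ⟨p', hpt', hpc', hf'⟩
      · exact absurd hpb (hno p hpt)
      · rw [hf']
        exact hz p' hpt'
    · have hdf : (PySem.Set.ofList (t.map (fun p => p.2.2))).discard z.2.2
          = (PySem.Set.ofList (t.map (fun p => p.2.2))).filter (fun y => !y == z.2.2) := rfl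
      rw [hdf]
      refine List.Pairwise.imp_of_mem ?_ ((ih ht).filter _)
      intro a b ha hb hab
      rcases List.mem_filter.mp ha with ⟨_, hane⟩
      rcases List.mem_filter.mp hb with ⟨_, hbne⟩
      have hane' : z.2.2 ≠ a := by
        intro h; rw [h] at hane; simp at hane
      have hbne' : z.2.2 ≠ b := by
        intro h; rw [h] at hbne; simp at hbne
      simpa [pvFo, hane', hbne'] using hab

theorem pvMain (l : List (String × String)) : build_category_order l = build_category_order_alt l := by
  obtain ⟨hmap, -, hpair⟩ := pvFold l 0 [] (by simp) (by simp)
  have hEperm : (List.foldl (fun a x => PySem.List.insertBy pvBL x a) [] (pvEn 0 l)).Perm (pvEn 0 l) := by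
    have : List.foldl (fun a x => PySem.List.insertBy pvBL x a) [] (pvEn 0 l)
        = PySem.List.sorted (pvEn 0 l) pvLexKey false := by
      rw [PySem.List.sorted_eq_foldl_insertBy]
      rfl
    rw [this]
    exact PySem.List.sorted_perm _ _ _
  set E := List.foldl (fun a x => PySem.List.insertBy pvBL x a) [] (pvEn 0 l) with hE
  set D := bestFold PySem.Dict.empty 0 l with hD
  -- A's value
  have hA : build_category_order l = PySem.Set.ofList (E.map (fun p => p.2.2)) := by
    unfold build_category_order
    rw [show (([] : List String), PySem.Set.empty) = (([] : List String), ([] : List String)) from rfl]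
    rw [pvAfold]
    rw [← PySem.Set.ofList_eq_foldl]
    congr 1
    rw [PySem.List.sorted_eq_foldl_insertBy]
    rw [show (fun acc x => PySem.List.insertBy (fun a b => decide (qKeyToInt a.1 < qKeyToInt b.1)) x acc)
        = (fun (acc : List (String × String)) x => PySem.List.insertBy pvBK x acc) from rfl]
    rw [show (List.foldl (fun acc x => PySem.List.insertBy pvBK x acc) [] l)
        = (List.foldl (fun acc x => PySem.List.insertBy pvBK x acc) (List.map Prod.snd []) l) from rfl]
    rw [← hmap, List.map_map]
    rfl
  -- dict facts
  have hkeys : D.keys = PySem.Set.ofList (l.map Prod.snd) := by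
    rw [hD, pvBFkeys, PySem.Dict.keys_empty, ← PySem.Set.ofList_eq_foldl]
  have hnodup : D.keys.Nodup := by
    rw [hkeys]; exact PySem.Set.nodup_ofList _
  have hget : ∀ c, D.get? c = pvFo E c := by
    intro c
    rw [hD, pvBF, PySem.Dict.get?_empty, pvFoMv l E hEperm hpair c]
    rfl
  -- the candidate sorted output
  have hitems : D.items = D.keys.map (fun k => (k, D.getD k (0, 0))) :=
    PySem.Dict.items_eq_map_keys D hnodup (0, 0)
  have hKperm : (PySem.Set.ofList (E.map (fun p => p.2.2))).Perm D.keys := by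
    apply (List.perm_ext_iff_of_nodup (PySem.Set.nodup_ofList _) hnodup).mpr
    intro x
    rw [PySem.Set.mem_ofList, hkeys, PySem.Set.mem_ofList]
    have h1 := (hEperm.map (fun p => p.2.2)).mem_iff (a := x)
    rw [h1, pvEnMap]
  have hperm : ((PySem.Set.ofList (E.map (fun p => p.2.2))).map (fun c => (c, D.getD c (0, 0)))).Perm D.items := by
    rw [hitems]
    exact hKperm.map _
  have hpw : ((PySem.Set.ofList (E.map (fun p => p.2.2))).map (fun c => (c, D.getD c (0, 0)))).Pairwise
      (fun a b => (fun kv => toLex ((fun kv => kv.2.1) kv, (fun kv => kv.2.2) kv)) a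
        < (fun kv => toLex ((fun kv => kv.2.1) kv, (fun kv => kv.2.2) kv)) b) := by
    rw [List.pairwise_map]
    refine List.Pairwise.imp_of_mem ?_ (pvDP E hpair)
    intro a b ha hb hab
    have hfa : ∃ va, pvFo E a = some va := by
      rcases pvFoSpec E a with ⟨h1, h2⟩ | ⟨p, hpm, hpc, hf⟩
      · exfalso
        have := (PySem.Set.mem_ofList _ a).mp ha
        obtain ⟨p, hpt, hpb⟩ := List.mem_map.mp this
        exact h2 p hpt hpb
      · exact ⟨_, hf⟩
    have hfb : ∃ vb, pvFo E b = some vb := by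
      rcases pvFoSpec E b with ⟨h1, h2⟩ | ⟨p, hpm, hpc, hf⟩
      · exfalso
        have := (PySem.Set.mem_ofList _ b).mp hb
        obtain ⟨p, hpt, hpb⟩ := List.mem_map.mp this
        exact h2 p hpt hpb
      · exact ⟨_, hf⟩
    obtain ⟨va, hva⟩ := hfa
    obtain ⟨vb, hvb⟩ := hfb
    have hda : D.getD a (0, 0) = va := by
      rw [PySem.Dict.getD_eq_get?_getD, hget, hva]; rfl
    have hdb : D.getD b (0, 0) = vb := by
      rw [PySem.Dict.getD_eq_get?_getD, hget, hvb]; rfl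
    rw [hva, hvb] at hab
    simpa [hda, hdb] using hab
  have hsorted : PySem.List.sorted D.items (fun kv => toLex ((fun kv => kv.2.1) kv, (fun kv => kv.2.2) kv)) false
      = (PySem.Set.ofList (E.map (fun p => p.2.2))).map (fun c => (c, D.getD c (0, 0))) :=
    PySem.List.sorted_eq_of_perm_of_pairwise_lt _ _ _ hperm hpw
  -- B's value
  unfold build_category_order_alt
  rw [pvSorted2Lex, ← hD, hsorted, hA, List.map_map]
  rw [show (Prod.fst ∘ fun c => (c, D.getD c (0, 0))) = id from rfl, List.map_id]

-- ===== VERDICT (by name: the statement is the Claim_ definition above) =====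
theorem build_category_order_spec : Claim_equal_build_category_order := by
  intro q2cat _
  unfold Spec_build_category_order
  exact pvMain q2cat
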